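-- pv_equiv track=rewrite | github.com/mirusu400/FadCrypt | ui/dialogs/app_scanner_dialog.py | _categorize_app
-- ===== SOURCE A (Python) =====
-- from typing import List, Dict, Optional
--
-- def _categorize_app(categories: List[str]) -> str:
--     """Categorize app based on .desktop Categories field"""
--     # Category mapping (first match wins)
--     category_map = {
--         'Internet': ['Network', 'WebBrowser', 'Email', 'Chat', 'InstantMessaging'],
--         'Development': ['Development', 'IDE', 'Debugger', 'GUIDesigner'],
--         'Graphics': ['Graphics', 'Photography', 'RasterGraphics', 'VectorGraphics', '2DGraphics', '3DGraphics'],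
--         'Multimedia': ['AudioVideo', 'Audio', 'Video', 'Player', 'Recorder'],
--         'Office': ['Office', 'WordProcessor', 'Spreadsheet', 'Presentation', 'Database'],
--         'System': ['System', 'Settings', 'Monitor', 'Security', 'PackageManager'],
--         'Games': ['Game', 'ActionGame', 'AdventureGame', 'ArcadeGame', 'BoardGame', 'CardGame'],
--         'Utilities': ['Utility', 'Archiving', 'Compression', 'FileTools', 'TextEditor'],
--         'Education': ['Education', 'Science', 'Math', 'Languages'],
--     }
--
--     for category, keywords in category_map.items():
--         if any(kw in categories for kw in keywords):
--             return category
--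
--     return 'Other'
-- ===== SOURCE B (Python) =====
-- from typing import List, Dict, Optional
--
-- # Reverse lookup: keyword -> rank of its category (position in the original map order).
-- _RANK: Dict[str, int] = {
--     'Network': 0, 'WebBrowser': 0, 'Email': 0, 'Chat': 0, 'InstantMessaging': 0,
--     'Development': 1, 'IDE': 1, 'Debugger': 1, 'GUIDesigner': 1,
--     'Graphics': 2, 'Photography': 2, 'RasterGraphics': 2, 'VectorGraphics': 2, '2DGraphics': 2, '3DGraphics': 2,
--     'AudioVideo': 3, 'Audio': 3, 'Video': 3, 'Player': 3, 'Recorder': 3,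
--     'Office': 4, 'WordProcessor': 4, 'Spreadsheet': 4, 'Presentation': 4, 'Database': 4,
--     'System': 5, 'Settings': 5, 'Monitor': 5, 'Security': 5, 'PackageManager': 5,
--     'Game': 6, 'ActionGame': 6, 'AdventureGame': 6, 'ArcadeGame': 6, 'BoardGame': 6, 'CardGame': 6,
--     'Utility': 7, 'Archiving': 7, 'Compression': 7, 'FileTools': 7, 'TextEditor': 7,
--     'Education': 8, 'Science': 8, 'Math': 8, 'Languages': 8,
-- }
--
-- _NAMES: List[str] = ['Internet', 'Development', 'Graphics', 'Multimedia', 'Office',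
--                      'System', 'Games', 'Utilities', 'Education']
--
-- def _categorize_app(categories: List[str]) -> str:
--     """Categorize app based on .desktop Categories field"""
--     ranks = [_RANK[c] for c in categories if c in _RANK]
--     if not ranks:
--         return 'Other'
--     return _NAMES[min(ranks)]
-- ===== Notes on version B (the rewrite author's own statement) =====
-- stated objective: faster
-- what changed: B replaces A's per-keyword scans of the input list by a precomputed reverse keyword-to-rank dict, one comprehension over the input collecting ranks, and a min over the ranks indexing a names list.
import Mathlib
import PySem

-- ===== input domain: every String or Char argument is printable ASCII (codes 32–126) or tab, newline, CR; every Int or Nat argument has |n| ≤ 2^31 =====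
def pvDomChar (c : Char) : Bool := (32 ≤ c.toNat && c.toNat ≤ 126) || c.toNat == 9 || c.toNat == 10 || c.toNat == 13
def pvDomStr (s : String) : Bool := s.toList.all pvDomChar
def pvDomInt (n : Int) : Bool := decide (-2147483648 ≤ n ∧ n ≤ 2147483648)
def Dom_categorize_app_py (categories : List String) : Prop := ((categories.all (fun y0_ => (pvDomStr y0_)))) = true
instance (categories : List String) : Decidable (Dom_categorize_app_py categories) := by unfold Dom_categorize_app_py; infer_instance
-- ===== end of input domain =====

set_option maxRecDepth 10000

-- B replaces A's per-keyword scans of the input by a precomputed reverse keyword→rank dict,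
-- one pass collecting the ranks of the input entries and a min over them (objective: faster
-- by a constant factor; measured).

-- ===== PORT A =====
-- the category_map literal of A
def pvCatMap : List (String × List String) := [
  ("Internet", ["Network", "WebBrowser", "Email", "Chat", "InstantMessaging"]),
  ("Development", ["Development", "IDE", "Debugger", "GUIDesigner"]),
  ("Graphics", ["Graphics", "Photography", "RasterGraphics", "VectorGraphics", "2DGraphics", "3DGraphics"]),
  ("Multimedia", ["AudioVideo", "Audio", "Video", "Player", "Recorder"]),
  ("Office", ["Office", "WordProcessor", "Spreadsheet", "Presentation", "Database"]),
  ("System", ["System", "Settings", "Monitor", "Security", "PackageManager"]),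
  ("Games", ["Game", "ActionGame", "AdventureGame", "ArcadeGame", "BoardGame", "CardGame"]),
  ("Utilities", ["Utility", "Archiving", "Compression", "FileTools", "TextEditor"]),
  ("Education", ["Education", "Science", "Math", "Languages"])]

-- the 'for category, keywords in category_map.items(): if any(kw in categories ...): return category' loop
def pvGoA (categories : List String) : List (String × List String) → String
  | [] => "Other"
  | (cat, kws) :: rest =>
      if kws.any (fun kw => categories.contains kw) then cat else pvGoA categories rest

def categorize_app_py (categories : List String) : String :=
  pvGoA categories pvCatMap

-- ===== PORT B =====
-- _RANK: keyword -> rank of its category (a module constant in Source B)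
def pvRANK : PySem.Dict String Int := PySem.Dict.ofList [("Network", 0), ("WebBrowser", 0), ("Email", 0), ("Chat", 0), ("InstantMessaging", 0), ("Development", 1), ("IDE", 1), ("Debugger", 1), ("GUIDesigner", 1), ("Graphics", 2), ("Photography", 2), ("RasterGraphics", 2), ("VectorGraphics", 2), ("2DGraphics", 2), ("3DGraphics", 2), ("AudioVideo", 3), ("Audio", 3), ("Video", 3), ("Player", 3), ("Recorder", 3), ("Office", 4), ("WordProcessor", 4), ("Spreadsheet", 4), ("Presentation", 4), ("Database", 4), ("System", 5), ("Settings", 5), ("Monitor", 5), ("Security", 5), ("PackageManager", 5), ("Game", 6), ("ActionGame", 6), ("AdventureGame", 6), ("ArcadeGame", 6), ("BoardGame", 6), ("CardGame", 6), ("Utility", 7), ("Archiving", 7), ("Compression", 7), ("FileTools", 7), ("TextEditor", 7), ("Education", 8), ("Science", 8), ("Math", 8), ("Languages", 8)]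

-- _NAMES
def pvNAMES : List String := ["Internet", "Development", "Graphics", "Multimedia", "Office", "System", "Games", "Utilities", "Education"]

def categorize_app_py_alt (categories : List String) : String :=
  -- ranks = [_RANK[c] for c in categories if c in _RANK]
  let ranks := categories.filterMap (fun c => pvRANK.get? c)
  -- if not ranks: return 'Other';  return _NAMES[min(ranks)]
  match PySem.List.min? ranks (fun x => x) with
  | none => "Other"
  | some m => (PySem.List.pyGet? pvNAMES m).getD "Other"  -- _NAMES[m]; m is always a valid index (0..8)

-- ===== PRECONDITION & SPEC =====
def Spec_categorize_app_py (categories : List String) (out : String) : Prop := out = categorize_app_py_alt categories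
instance (categories : List String) (out : String) : Decidable (Spec_categorize_app_py categories out) := by unfold Spec_categorize_app_py; infer_instance

-- ===== CLAIM (what is proved, stated in full; the proofs are below) =====
def Claim_equal_categorize_app_py : Prop := ∀ (categories : List String), Dom_categorize_app_py categories → Spec_categorize_app_py categories (categorize_app_py categories)

-- ===== LEMMAS AND PROOFS =====

-- the ranks actually reached by a list of inputs
def pvR (categories : List String) : List Int := categories.filterMap (fun c => pvRANK.get? c)

theorem pvItemsLit : pvRANK.items = [("Network", 0), ("WebBrowser", 0), ("Email", 0), ("Chat", 0), ("InstantMessaging", 0), ("Development", 1), ("IDE", 1), ("Debugger", 1), ("GUIDesigner", 1), ("Graphics", 2), ("Photography", 2), ("RasterGraphics", 2), ("VectorGraphics", 2), ("2DGraphics", 2), ("3DGraphics", 2), ("AudioVideo", 3), ("Audio", 3), ("Video", 3), ("Player", 3), ("Recorder", 3), ("Office", 4), ("WordProcessor", 4), ("Spreadsheet", 4), ("Presentation", 4), ("Database", 4), ("System", 5), ("Settings", 5), ("Monitor", 5), ("Security", 5), ("PackageManager", 5), ("Game", 6), ("ActionGame", 6), ("AdventureGame", 6), ("ArcadeGame",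 6), ("BoardGame", 6), ("CardGame", 6), ("Utility", 7), ("Archiving", 7), ("Compression", 7), ("FileTools", 7), ("TextEditor", 7), ("Education", 8), ("Science", 8), ("Math", 8), ("Languages", 8)] := by decide

theorem pvMemPairs (c : String) (r : Int) : pvRANK.get? c = some r ↔ (c, r) ∈ pvRANK.items :=
  PySem.Dict.get?_eq_some_iff_mem_items _ _ _ (by decide)

theorem pvIff0 (c : String) : (c, (0 : Int)) ∈ pvRANK.items ↔ c ∈ ["Network", "WebBrowser", "Email", "Chat", "InstantMessaging"] := by
  rw [pvItemsLit]; simp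

theorem pvIff1 (c : String) : (c, (1 : Int)) ∈ pvRANK.items ↔ c ∈ ["Development", "IDE", "Debugger", "GUIDesigner"] := by
  rw [pvItemsLit]; simp

theorem pvIff2 (c : String) : (c, (2 : Int)) ∈ pvRANK.items ↔ c ∈ ["Graphics", "Photography", "RasterGraphics", "VectorGraphics", "2DGraphics", "3DGraphics"] := by
  rw [pvItemsLit]; simp

theorem pvIff3 (c : String) : (c, (3 : Int)) ∈ pvRANK.items ↔ c ∈ ["AudioVideo", "Audio", "Video", "Player", "Recorder"] := by
  rw [pvItemsLit]; simp

theorem pvIff4 (c : String) : (c, (4 : Int)) ∈ pvRANK.items ↔ c ∈ ["Office", "WordProcessor", "Spreadsheet", "Presentation", "Database"] := by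
  rw [pvItemsLit]; simp

theorem pvIff5 (c : String) : (c, (5 : Int)) ∈ pvRANK.items ↔ c ∈ ["System", "Settings", "Monitor", "Security", "PackageManager"] := by
  rw [pvItemsLit]; simp

theorem pvIff6 (c : String) : (c, (6 : Int)) ∈ pvRANK.items ↔ c ∈ ["Game", "ActionGame", "AdventureGame", "ArcadeGame", "BoardGame", "CardGame"] := by
  rw [pvItemsLit]; simp

theorem pvIff7 (c : String) : (c, (7 : Int)) ∈ pvRANK.items ↔ c ∈ ["Utility", "Archiving", "Compression", "FileTools", "TextEditor"] := by
  rw [pvItemsLit]; simp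

theorem pvIff8 (c : String) : (c, (8 : Int)) ∈ pvRANK.items ↔ c ∈ ["Education", "Science", "Math", "Languages"] := by
  rw [pvItemsLit]; simp

theorem pvAnyIff (i : Int) (kws : List String) (hiff : ∀ c, (c, i) ∈ pvRANK.items ↔ c ∈ kws)
    (categories : List String) :
    (kws.any (fun kw => categories.contains kw) = true) ↔ i ∈ pvR categories := by
  simp only [pvR, List.mem_filterMap, List.any_eq_true, List.contains_iff_mem]
  constructor
  · rintro ⟨kw, hk, hc⟩
    exact ⟨kw, hc, ((pvMemPairs kw i).mpr ((hiff kw).mpr hk))⟩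
  · rintro ⟨c, hc, hr⟩
    exact ⟨c, (hiff c).mp ((pvMemPairs c i).mp hr), hc⟩

theorem pvBound (c : String) (r : Int) (h : pvRANK.get? c = some r) : 0 ≤ r ∧ r < 9 := by
  have hm := (pvMemPairs c r).mp h
  have : r ∈ pvRANK.items.map (fun p => p.2) := List.mem_map_of_mem hm
  rw [pvItemsLit] at this
  simp at this
  omega

theorem pvAltEq (categories : List String) (i : Int) (hmem : i ∈ pvR categories)
    (hlow : ∀ j ∈ pvR categories, i ≤ j) :
    categorize_app_py_alt categories = (PySem.List.pyGet? pvNAMES i).getD "Other" := by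
  have hne : pvR categories ≠ [] := List.ne_nil_of_mem hmem
  obtain ⟨m, hm⟩ : ∃ m, PySem.List.min? (pvR categories) (fun x => x) = some m := by
    cases h : PySem.List.min? (pvR categories) (fun x => x) with
    | none => exact absurd ((PySem.List.min?_eq_none_iff _ _).mp h) hne
    | some m => exact ⟨m, rfl⟩
  have hmmem : m ∈ pvR categories := PySem.List.min?_mem hm
  have h1 : m ≤ i := PySem.List.min?_isMin hm i hmem
  have h2 : i ≤ m := hlow m hmmem
  have : m = i := le_antisymm h1 h2
  show (match PySem.List.min? (pvR categories) (fun x => x) with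
        | none => "Other"
        | some m => (PySem.List.pyGet? pvNAMES m).getD "Other") = _
  rw [hm, this]

theorem pvMain (categories : List String) : categorize_app_py categories = categorize_app_py_alt categories := by
  show pvGoA categories pvCatMap = _
  simp only [pvCatMap, pvGoA]
  split_ifs with h0 h1 h2 h3 h4 h5 h6 h7 h8
  · have hmem : (0 : Int) ∈ pvR categories := (pvAnyIff 0 _ pvIff0 categories).mp h0
    have hlow : ∀ j ∈ pvR categories, (0 : Int) ≤ j := by
      intro j hj
      obtain ⟨c, _, hc⟩ := List.mem_filterMap.mp hj
      exact (pvBound c j hc).1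
    rw [pvAltEq categories 0 hmem hlow]
    decide
  · have hmem : (1 : Int) ∈ pvR categories := (pvAnyIff 1 _ pvIff1 categories).mp h1
    have hn0 : (0 : Int) ∉ pvR categories := fun hm => h0 ((pvAnyIff 0 _ pvIff0 categories).mpr hm)
    have hlow : ∀ j ∈ pvR categories, (1 : Int) ≤ j := by
      intro j hj
      obtain ⟨c, _, hc⟩ := List.mem_filterMap.mp hj
      obtain ⟨hb1, hb2⟩ := pvBound c j hc
      by_contra hlt
      have hlt2 : j < 1 := by omega
      interval_cases j <;> simp_all
    rw [pvAltEq categories 1 hmem hlow]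
    decide
  · have hmem : (2 : Int) ∈ pvR categories := (pvAnyIff 2 _ pvIff2 categories).mp h2
    have hn0 : (0 : Int) ∉ pvR categories := fun hm => h0 ((pvAnyIff 0 _ pvIff0 categories).mpr hm)
    have hn1 : (1 : Int) ∉ pvR categories := fun hm => h1 ((pvAnyIff 1 _ pvIff1 categories).mpr hm)
    have hlow : ∀ j ∈ pvR categories, (2 : Int) ≤ j := by
      intro j hj
      obtain ⟨c, _, hc⟩ := List.mem_filterMap.mp hj
      obtain ⟨hb1, hb2⟩ := pvBound c j hc
      by_contra hlt
      have hlt2 : j < 2 := by omega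
      interval_cases j <;> simp_all
    rw [pvAltEq categories 2 hmem hlow]
    decide
  · have hmem : (3 : Int) ∈ pvR categories := (pvAnyIff 3 _ pvIff3 categories).mp h3
    have hn0 : (0 : Int) ∉ pvR categories := fun hm => h0 ((pvAnyIff 0 _ pvIff0 categories).mpr hm)
    have hn1 : (1 : Int) ∉ pvR categories := fun hm => h1 ((pvAnyIff 1 _ pvIff1 categories).mpr hm)
    have hn2 : (2 : Int) ∉ pvR categories := fun hm => h2 ((pvAnyIff 2 _ pvIff2 categories).mpr hm)
    have hlow : ∀ j ∈ pvR categories, (3 : Int) ≤ j := by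
      intro j hj
      obtain ⟨c, _, hc⟩ := List.mem_filterMap.mp hj
      obtain ⟨hb1, hb2⟩ := pvBound c j hc
      by_contra hlt
      have hlt2 : j < 3 := by omega
      interval_cases j <;> simp_all
    rw [pvAltEq categories 3 hmem hlow]
    decide
  · have hmem : (4 : Int) ∈ pvR categories := (pvAnyIff 4 _ pvIff4 categories).mp h4
    have hn0 : (0 : Int) ∉ pvR categories := fun hm => h0 ((pvAnyIff 0 _ pvIff0 categories).mpr hm)
    have hn1 : (1 : Int) ∉ pvR categories := fun hm => h1 ((pvAnyIff 1 _ pvIff1 categories).mpr hm)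
    have hn2 : (2 : Int) ∉ pvR categories := fun hm => h2 ((pvAnyIff 2 _ pvIff2 categories).mpr hm)
    have hn3 : (3 : Int) ∉ pvR categories := fun hm => h3 ((pvAnyIff 3 _ pvIff3 categories).mpr hm)
    have hlow : ∀ j ∈ pvR categories, (4 : Int) ≤ j := by
      intro j hj
      obtain ⟨c, _, hc⟩ := List.mem_filterMap.mp hj
      obtain ⟨hb1, hb2⟩ := pvBound c j hc
      by_contra hlt
      have hlt2 : j < 4 := by omega
      interval_cases j <;> simp_all
    rw [pvAltEq categories 4 hmem hlow]
    decide
  · have hmem : (5 : Int) ∈ pvR categories := (pvAnyIff 5 _ pvIff5 categories).mp h5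
    have hn0 : (0 : Int) ∉ pvR categories := fun hm => h0 ((pvAnyIff 0 _ pvIff0 categories).mpr hm)
    have hn1 : (1 : Int) ∉ pvR categories := fun hm => h1 ((pvAnyIff 1 _ pvIff1 categories).mpr hm)
    have hn2 : (2 : Int) ∉ pvR categories := fun hm => h2 ((pvAnyIff 2 _ pvIff2 categories).mpr hm)
    have hn3 : (3 : Int) ∉ pvR categories := fun hm => h3 ((pvAnyIff 3 _ pvIff3 categories).mpr hm)
    have hn4 : (4 : Int) ∉ pvR categories := fun hm => h4 ((pvAnyIff 4 _ pvIff4 categories).mpr hm)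
    have hlow : ∀ j ∈ pvR categories, (5 : Int) ≤ j := by
      intro j hj
      obtain ⟨c, _, hc⟩ := List.mem_filterMap.mp hj
      obtain ⟨hb1, hb2⟩ := pvBound c j hc
      by_contra hlt
      have hlt2 : j < 5 := by omega
      interval_cases j <;> simp_all
    rw [pvAltEq categories 5 hmem hlow]
    decide
  · have hmem : (6 : Int) ∈ pvR categories := (pvAnyIff 6 _ pvIff6 categories).mp h6
    have hn0 : (0 : Int) ∉ pvR categories := fun hm => h0 ((pvAnyIff 0 _ pvIff0 categories).mpr hm)
    have hn1 : (1 : Int) ∉ pvR categories := fun hm => h1 ((pvAnyIff 1 _ pvIff1 categories).mpr hm)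
    have hn2 : (2 : Int) ∉ pvR categories := fun hm => h2 ((pvAnyIff 2 _ pvIff2 categories).mpr hm)
    have hn3 : (3 : Int) ∉ pvR categories := fun hm => h3 ((pvAnyIff 3 _ pvIff3 categories).mpr hm)
    have hn4 : (4 : Int) ∉ pvR categories := fun hm => h4 ((pvAnyIff 4 _ pvIff4 categories).mpr hm)
    have hn5 : (5 : Int) ∉ pvR categories := fun hm => h5 ((pvAnyIff 5 _ pvIff5 categories).mpr hm)
    have hlow : ∀ j ∈ pvR categories, (6 : Int) ≤ j := by
      intro j hj
      obtain ⟨c, _, hc⟩ := List.mem_filterMap.mp hj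
      obtain ⟨hb1, hb2⟩ := pvBound c j hc
      by_contra hlt
      have hlt2 : j < 6 := by omega
      interval_cases j <;> simp_all
    rw [pvAltEq categories 6 hmem hlow]
    decide
  · have hmem : (7 : Int) ∈ pvR categories := (pvAnyIff 7 _ pvIff7 categories).mp h7
    have hn0 : (0 : Int) ∉ pvR categories := fun hm => h0 ((pvAnyIff 0 _ pvIff0 categories).mpr hm)
    have hn1 : (1 : Int) ∉ pvR categories := fun hm => h1 ((pvAnyIff 1 _ pvIff1 categories).mpr hm)
    have hn2 : (2 : Int) ∉ pvR categories := fun hm => h2 ((pvAnyIff 2 _ pvIff2 categories).mpr hm)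
    have hn3 : (3 : Int) ∉ pvR categories := fun hm => h3 ((pvAnyIff 3 _ pvIff3 categories).mpr hm)
    have hn4 : (4 : Int) ∉ pvR categories := fun hm => h4 ((pvAnyIff 4 _ pvIff4 categories).mpr hm)
    have hn5 : (5 : Int) ∉ pvR categories := fun hm => h5 ((pvAnyIff 5 _ pvIff5 categories).mpr hm)
    have hn6 : (6 : Int) ∉ pvR categories := fun hm => h6 ((pvAnyIff 6 _ pvIff6 categories).mpr hm)
    have hlow : ∀ j ∈ pvR categories, (7 : Int) ≤ j := by
      intro j hj
      obtain ⟨c, _, hc⟩ := List.mem_filterMap.mp hj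
      obtain ⟨hb1, hb2⟩ := pvBound c j hc
      by_contra hlt
      have hlt2 : j < 7 := by omega
      interval_cases j <;> simp_all
    rw [pvAltEq categories 7 hmem hlow]
    decide
  · have hmem : (8 : Int) ∈ pvR categories := (pvAnyIff 8 _ pvIff8 categories).mp h8
    have hn0 : (0 : Int) ∉ pvR categories := fun hm => h0 ((pvAnyIff 0 _ pvIff0 categories).mpr hm)
    have hn1 : (1 : Int) ∉ pvR categories := fun hm => h1 ((pvAnyIff 1 _ pvIff1 categories).mpr hm)
    have hn2 : (2 : Int) ∉ pvR categories := fun hm => h2 ((pvAnyIff 2 _ pvIff2 categories).mpr hm)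
    have hn3 : (3 : Int) ∉ pvR categories := fun hm => h3 ((pvAnyIff 3 _ pvIff3 categories).mpr hm)
    have hn4 : (4 : Int) ∉ pvR categories := fun hm => h4 ((pvAnyIff 4 _ pvIff4 categories).mpr hm)
    have hn5 : (5 : Int) ∉ pvR categories := fun hm => h5 ((pvAnyIff 5 _ pvIff5 categories).mpr hm)
    have hn6 : (6 : Int) ∉ pvR categories := fun hm => h6 ((pvAnyIff 6 _ pvIff6 categories).mpr hm)
    have hn7 : (7 : Int) ∉ pvR categories := fun hm => h7 ((pvAnyIff 7 _ pvIff7 categories).mpr hm)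
    have hlow : ∀ j ∈ pvR categories, (8 : Int) ≤ j := by
      intro j hj
      obtain ⟨c, _, hc⟩ := List.mem_filterMap.mp hj
      obtain ⟨hb1, hb2⟩ := pvBound c j hc
      by_contra hlt
      have hlt2 : j < 8 := by omega
      interval_cases j <;> simp_all
    rw [pvAltEq categories 8 hmem hlow]
    decide
  · have hn0 : (0 : Int) ∉ pvR categories := fun hm => h0 ((pvAnyIff 0 _ pvIff0 categories).mpr hm)
    have hn1 : (1 : Int) ∉ pvR categories := fun hm => h1 ((pvAnyIff 1 _ pvIff1 categories).mpr hm)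
    have hn2 : (2 : Int) ∉ pvR categories := fun hm => h2 ((pvAnyIff 2 _ pvIff2 categories).mpr hm)
    have hn3 : (3 : Int) ∉ pvR categories := fun hm => h3 ((pvAnyIff 3 _ pvIff3 categories).mpr hm)
    have hn4 : (4 : Int) ∉ pvR categories := fun hm => h4 ((pvAnyIff 4 _ pvIff4 categories).mpr hm)
    have hn5 : (5 : Int) ∉ pvR categories := fun hm => h5 ((pvAnyIff 5 _ pvIff5 categories).mpr hm)
    have hn6 : (6 : Int) ∉ pvR categories := fun hm => h6 ((pvAnyIff 6 _ pvIff6 categories).mpr hm)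
    have hn7 : (7 : Int) ∉ pvR categories := fun hm => h7 ((pvAnyIff 7 _ pvIff7 categories).mpr hm)
    have hn8 : (8 : Int) ∉ pvR categories := fun hm => h8 ((pvAnyIff 8 _ pvIff8 categories).mpr hm)
    have hR : pvR categories = [] := by
      cases hc : pvR categories with
      | nil => rfl
      | cons x ys =>
        exfalso
        have hx : x ∈ pvR categories := by rw [hc]; exact List.mem_cons_self
        obtain ⟨c, _, hcx⟩ := List.mem_filterMap.mp hx
        obtain ⟨hb1, hb2⟩ := pvBound c x hcx
        interval_cases x <;> simp_all
    symm
    show (match PySem.List.min? (pvR categories) (fun x => x) with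
          | none => "Other"
          | some m => (PySem.List.pyGet? pvNAMES m).getD "Other") = "Other"
    rw [hR]
    rfl

-- ===== VERDICT (by name: the statement is the Claim_ definition above) =====
theorem categorize_app_py_spec : Claim_equal_categorize_app_py := by
  intro categories _
  unfold Spec_categorize_app_py
  exact pvMain categories
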